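-- pv_equiv track=rewrite | github.com/jarrodhurteau/ServLine | storage/price_integrity.py | _extract_price_family_key
-- ===== SOURCE A (Python) =====
-- from typing import Any, Dict, List, Optional, Tuple
--
-- def _extract_price_family_key(item: Dict[str, Any]) -> Optional[str]:
--     """
--     Decide which variant 'family' this item belongs to for price analysis.
--
--     Strategy:
--       - Prefer size-based families (e.g., size:10in, size:12in)
--       - Fallback to category-only when no obvious size family exists
--     """
--     variants = item.get("variants") or []
--     size_keys: List[str] = []
--     other_keys: List[str] = []
--
--     for v in variants:
--         kind = (v.get("kind") or "").lower()
--         gk = v.get("group_key")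
--         if not gk:
--             continue
--         if kind == "size":
--             size_keys.append(gk)
--         else:
--             other_keys.append(gk)
--
--     if size_keys:
--         # Use first size family as the main key for this item.
--         return size_keys[0]
--     if other_keys:
--         # Fallback: some other family (flavor/style).
--         return other_keys[0]
--     return None
-- ===== SOURCE B (Python) =====
-- from typing import Any, Dict, Optional
--
--
-- def _extract_price_family_key(item: Dict[str, Any]) -> Optional[str]:
--     """Pick the first size family key, else the first other family key."""
--     variants = item.get("variants") or []
--     first_size = next((v.get("group_key") for v in variants
--                        if (v.get("kind") or "").lower() == "size" and v.get("group_key")), None)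
--     if first_size is not None:
--         return first_size
--     return next((v.get("group_key") for v in variants
--                  if (v.get("kind") or "").lower() != "size" and v.get("group_key")), None)
-- ===== Notes on version B (the rewrite author's own statement) =====
-- stated objective: idiomatic
-- what changed: Replaces the single loop that accumulates two key lists with two short-circuiting first-match scans via next() over generator expressions, returning the first size key or else the first other key.
import Mathlib
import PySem

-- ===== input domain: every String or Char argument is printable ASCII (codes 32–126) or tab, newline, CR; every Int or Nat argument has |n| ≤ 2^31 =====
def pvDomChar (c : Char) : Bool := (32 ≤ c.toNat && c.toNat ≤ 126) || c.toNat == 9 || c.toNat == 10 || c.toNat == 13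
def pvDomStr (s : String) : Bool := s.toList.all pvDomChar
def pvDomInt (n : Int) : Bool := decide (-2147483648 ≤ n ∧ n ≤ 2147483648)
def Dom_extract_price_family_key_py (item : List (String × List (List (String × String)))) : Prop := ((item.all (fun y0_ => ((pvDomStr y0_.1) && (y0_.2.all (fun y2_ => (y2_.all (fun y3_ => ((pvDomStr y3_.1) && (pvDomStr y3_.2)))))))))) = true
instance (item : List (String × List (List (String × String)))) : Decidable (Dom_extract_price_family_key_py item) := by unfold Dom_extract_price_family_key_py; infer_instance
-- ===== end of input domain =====

-- B replaces A's single loop that accumulates two key lists by two independent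
-- short-circuiting first-match scans (next() over generator expressions); idiomatic, not faster.

-- ===== PORT A =====
-- A-side helper: the body of A's for-loop (append gk to size_keys or other_keys)
def pvStep (acc : List String × List String) (v : List (String × String)) : List String × List String :=
  let kind := PySem.Str.lower (((PySem.Dict.mk v).get? "kind").getD "")
  match (PySem.Dict.mk v).get? "group_key" with
  | none => acc
  | some gk =>
    if gk = "" then acc
    else if kind = "size" then (acc.1 ++ [gk], acc.2)
    else (acc.1, acc.2 ++ [gk])

-- one loop over variants building size_keys and other_keys, then the first of each
def extract_price_family_key_py (item : List (String × List (List (String × String)))) : Option String :=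
  -- item.get("variants") or []  (a falsy [] stays [])
  let variants : List (List (String × String)) :=
    match (PySem.Dict.mk item).get? "variants" with
    | none => []
    | some l => if l = [] then [] else l
  let p : List String × List String := variants.foldl pvStep ([], [])
  match p.1 with
  | k :: _ => some k
  | [] =>
    match p.2 with
    | k :: _ => some k
    | [] => none

-- ===== PORT B =====
-- first truthy group_key among variants whose lowered kind is (resp. is not) "size"
def pvFirstKey (want : Bool) : List (List (String × String)) → Option String
  | [] => none
  | v :: rest =>
    let kind := PySem.Str.lower (((PySem.Dict.mk v).get? "kind").getD "")
    match (PySem.Dict.mk v).get? "group_key" with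
    | some gk =>
      if ((kind = "size") = (want = true)) ∧ gk ≠ "" then some gk else pvFirstKey want rest
    | none => pvFirstKey want rest

def extract_price_family_key_py_alt (item : List (String × List (List (String × String)))) : Option String :=
  let variants : List (List (String × String)) :=
    match (PySem.Dict.mk item).get? "variants" with
    | none => []
    | some l => if l = [] then [] else l
  match pvFirstKey true variants with
  | some k => some k
  | none => pvFirstKey false variants

-- ===== PRECONDITION & SPEC =====
def Spec_extract_price_family_key_py (item : List (String × List (List (String × String)))) (out : Option String) : Prop := out = extract_price_family_key_py_alt item
instance (item : List (String × List (List (String × String)))) (out : Option String) : Decidable (Spec_extract_price_family_key_py item out) := by unfold Spec_extract_price_family_key_py; infer_instance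

-- ===== CLAIM (what is proved, stated in full; the proofs are below) =====
def Claim_equal_extract_price_family_key_py : Prop := ∀ (item : List (String × List (List (String × String)))), Dom_extract_price_family_key_py item → Spec_extract_price_family_key_py item (extract_price_family_key_py item)

-- ===== LEMMAS AND PROOFS =====

-- the two key lists the fold produces, written as structural recursions
def pvKeys (want : Bool) : List (List (String × String)) → List String
  | [] => []
  | v :: rest =>
    let kind := PySem.Str.lower (((PySem.Dict.mk v).get? "kind").getD "")
    match (PySem.Dict.mk v).get? "group_key" with
    | some gk =>
      if ((kind = "size") = (want = true)) ∧ gk ≠ "" then gk :: pvKeys want rest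
      else pvKeys want rest
    | none => pvKeys want rest

theorem pv_foldl_eq (vs : List (List (String × String))) :
    ∀ a b : List String,
      vs.foldl pvStep (a, b) = (a ++ pvKeys true vs, b ++ pvKeys false vs) := by
  induction vs with
  | nil => intro a b; simp [pvKeys]
  | cons v rest ih =>
    intro a b
    simp only [List.foldl_cons, pvStep, pvKeys]
    cases hgk : (PySem.Dict.mk v).get? "group_key" with
    | none => simpa using ih a b
    | some gk =>
      by_cases hempty : gk = ""
      · subst hempty; simp [ih a b]
      · by_cases hsize : PySem.Str.lower (((PySem.Dict.mk v).get? "kind").getD "") = "size"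
        · simp [hempty, hsize, ih (a ++ [gk]) b]
        · simp [hempty, hsize, ih a (b ++ [gk])]

theorem pvFirstKey_eq_head (want : Bool) (vs : List (List (String × String))) :
    pvFirstKey want vs = (pvKeys want vs).head? := by
  induction vs with
  | nil => rfl
  | cons v rest ih =>
    simp only [pvFirstKey, pvKeys]
    cases (PySem.Dict.mk v).get? "group_key" with
    | none => exact ih
    | some gk =>
      dsimp only
      by_cases h :
          (PySem.Str.lower (((PySem.Dict.mk v).get? "kind").getD "") = "size") = (want = true) ∧ gk ≠ ""
      · rw [if_pos h, if_pos h]; rfl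
      · rw [if_neg h, if_neg h]; exact ih

theorem pv_main (vs : List (List (String × String))) :
    (match (vs.foldl pvStep ([], [])).1 with
     | k :: _ => some k
     | [] =>
       match (vs.foldl pvStep ([], [])).2 with
       | k :: _ => some k
       | [] => none) =
    (match pvFirstKey true vs with
     | some k => some k
     | none => pvFirstKey false vs) := by
  rw [pv_foldl_eq vs [] [], pvFirstKey_eq_head, pvFirstKey_eq_head]
  cases pvKeys true vs with
  | cons k t => simp
  | nil =>
    cases pvKeys false vs with
    | cons k t => simp
    | nil => simp

-- ===== VERDICT (by name: the statement is the Claim_ definition above) =====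
theorem extract_price_family_key_py_spec : Claim_equal_extract_price_family_key_py := by
  intro item _
  unfold Spec_extract_price_family_key_py extract_price_family_key_py extract_price_family_key_py_alt
  exact pv_main _
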